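-- pv_equiv track=rewrite | github.com/ankushtanwar-amroar/Amroar_CRM_replace | backend/modules/field_management/services/rollup_formula_evaluator.py | _find_operator
-- ===== SOURCE A (Python) =====
-- def _find_operator(expr: str, op: str) -> int:
--     """Find operator index, ignoring those inside quotes or parentheses"""
--     depth = 0
--     in_string = False
--     string_char = None
--
--     for i in range(len(expr) - len(op) + 1):
--         char = expr[i]
--
--         # Handle string literals
--         if char in ('"', "'") and (i == 0 or expr[i-1] != '\\'):
--             if not in_string:
--                 in_string = True
--                 string_char = char
--             elif char == string_char:
--                 in_string = False
--                 string_char = None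
--
--         if in_string:
--             continue
--
--         # Handle parentheses
--         if char == '(':
--             depth += 1
--         elif char == ')':
--             depth -= 1
--
--         # Check for operator at current position
--         if depth == 0 and expr[i:i+len(op)] == op:
--             return i
--
--     return -1
-- ===== SOURCE B (Python) =====
-- def _find_operator(expr: str, op: str) -> int:
--     """Candidate-driven version: str.find proposes occurrence positions; each is
--     validated independently by recomputing quote/paren state over its prefix."""
--     start = 0
--     while True:
--         j = expr.find(op, start)
--         if j == -1:
--             return -1
--         if _is_top_level(expr, j):
--             return j
--         start = j + 1
--
-- def _is_top_level(expr: str, j: int) -> bool: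
--     depth = 0
--     in_string = False
--     string_char = None
--     for k in range(j + 1):
--         ch = expr[k]
--         if ch in ('"', "'") and (k == 0 or expr[k-1] != '\\'):
--             if not in_string:
--                 in_string = True
--                 string_char = ch
--             elif ch == string_char:
--                 in_string = False
--                 string_char = None
--         if in_string:
--             continue
--         if ch == '(':
--             depth += 1
--         elif ch == ')':
--             depth -= 1
--     return not in_string and depth == 0
-- ===== Notes on version B (the rewrite author's own statement) =====
-- stated objective: alternative
-- what changed: A's single stateful scan that checks the operator at every index is replaced by a candidate-driven search: str.find proposes each occurrence of op, and a separate helper validates each candidate by recomputing the quote/paren state over its prefix from scratch.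
-- outside the precondition, e.g. on _find_operator('ab', ''): A returns 0, B returns 0; on _find_operator('(', ''): A raises IndexError, B raises IndexError
import Mathlib
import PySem

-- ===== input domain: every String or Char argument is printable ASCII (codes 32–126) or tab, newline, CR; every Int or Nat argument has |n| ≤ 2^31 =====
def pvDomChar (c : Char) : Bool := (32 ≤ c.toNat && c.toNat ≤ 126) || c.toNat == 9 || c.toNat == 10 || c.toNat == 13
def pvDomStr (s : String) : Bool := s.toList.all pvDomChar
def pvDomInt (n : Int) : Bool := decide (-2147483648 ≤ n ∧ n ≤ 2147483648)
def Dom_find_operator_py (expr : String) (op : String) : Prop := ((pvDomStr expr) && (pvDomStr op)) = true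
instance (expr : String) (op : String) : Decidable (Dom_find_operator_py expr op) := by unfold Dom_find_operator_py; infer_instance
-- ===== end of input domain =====

-- B replaces A's single stateful scan by str.find-driven candidate positions, each validated
-- independently by recomputing the quote/paren state over its prefix; same results, different algorithm.

-- ===== PORT A =====
-- A: one loop over range(len(expr)-len(op)+1) carrying depth / in_string / string_char,
-- checking the operator at each index as it goes.
def aLoop (e o : List Char) : List Int → Int → Bool → Option Char → Int
  | [], _, _, _ => -1
  | i :: rest, depth, instr, sc =>
    match PySem.List.pyGet? e i with
    | none => -1   -- unreachable under Pre_ (Python raises IndexError here)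
    | some char =>
      let qs : Bool × Option Char :=
        if (char == '"' || char == '\'') && (i == 0 || !(PySem.List.pyGet? e (i-1) == some '\\')) then
          if !instr then (true, some char)
          else if sc == some char then (false, none)
          else (instr, sc)
        else (instr, sc)
      if qs.1 then aLoop e o rest depth qs.1 qs.2
      else
        let depth' := if char == '(' then depth + 1
                      else if char == ')' then depth - 1 else depth
        if depth' == 0 && PySem.List.slice e (some i) (some (i + PySem.List.len o)) == o then i
        else aLoop e o rest depth' qs.1 qs.2

def find_operator_py (expr : String) (op : String) : Int :=
  aLoop expr.toList op.toList
    (PySem.List.pyRange 0 (PySem.List.len expr.toList - PySem.List.len op.toList + 1) 1)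
    0 false none

-- ===== PORT B =====
-- B helper _is_top_level: a for-loop over range(j+1) folding the (depth, in_string, string_char)
-- state over the prefix, then the top-level test.
def bTop (e : List Char) (j : Int) : Bool :=
  let s := (PySem.List.pyRange 0 (j + 1) 1).foldl
    (fun (s : Int × Bool × Option Char) (k : Int) =>
      match PySem.List.pyGet? e k with
      | none => s   -- unreachable from bOuter's calls (Python raises IndexError here)
      | some ch =>
        let qs : Bool × Option Char :=
          if (ch == '"' || ch == '\'') && (k == 0 || !(PySem.List.pyGet? e (k-1) == some '\\')) then
            if !s.2.1 then (true, some ch)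
            else if s.2.2 == some ch then (false, none)
            else (s.2.1, s.2.2)
          else (s.2.1, s.2.2)
        if qs.1 then (s.1, qs.1, qs.2)
        else ((if ch == '(' then s.1 + 1 else if ch == ')' then s.1 - 1 else s.1), qs.1, qs.2))
    (0, false, none)
  !s.2.1 && (s.1 == 0)

-- hand port of str.find(op, start) for 0 ≤ start: first i ≥ start with expr[i:i+len(op)] == op, else -1
-- (exact for the nonnegative starts B uses)
def bFindGo (e o : List Char) : List Int → Int
  | [] => -1
  | i :: rest =>
    if PySem.List.slice e (some i) (some (i + PySem.List.len o)) == o then i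
    else bFindGo e o rest

def bFind (e o : List Char) (start : Int) : Int :=
  bFindGo e o (PySem.List.pyRange start (PySem.List.len e - PySem.List.len o + 1) 1)

-- B's while-True loop; fuel e.length + 1 is enough because start strictly increases and
-- stays ≤ len(expr) (the 0-fuel branch is unreachable from find_operator_py_alt).
def bOuter (e o : List Char) : Nat → Int → Int
  | 0, _ => -1
  | fuel + 1, start =>
    let j := bFind e o start
    if j == -1 then -1
    else if bTop e j then j
    else bOuter e o fuel (j + 1)

def find_operator_py_alt (expr : String) (op : String) : Int :=
  bOuter expr.toList op.toList (expr.toList.length + 1) 0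

-- ===== PRECONDITION & SPEC =====
-- Pre_ excludes empty op: there the loop bound len(expr)-len(op)+1 exceeds the last index, so A
-- (and B alike) indexes expr[len(expr)] and raises IndexError whenever no earlier top-level
-- position returns first; any value returned before that crash point is an accident of the same
-- out-of-range loop bound.
def Pre_find_operator_py (expr : String) (op : String) : Prop := op ≠ ""
instance (expr : String) (op : String) : Decidable (Pre_find_operator_py expr op) := by
  unfold Pre_find_operator_py; infer_instance
def pvWitness_find_operator_py : String × String := ("(a+b)+c", "+")

def Spec_find_operator_py (expr : String) (op : String) (out : Int) : Prop := out = find_operator_py_alt expr op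
instance (expr : String) (op : String) (out : Int) : Decidable (Spec_find_operator_py expr op out) := by unfold Spec_find_operator_py; infer_instance

-- ===== CLAIM (what is proved, stated in full; the proofs are below) =====
def Claim_equal_find_operator_py : Prop := ∀ (expr : String) (op : String), Dom_find_operator_py expr op → Pre_find_operator_py expr op → Spec_find_operator_py expr op (find_operator_py expr op)

-- ===== LEMMAS AND PROOFS =====

-- Proof-side pure state machine: (depth, in_string, string_char) after processing a prefix.
def pvQ (e : List Char) (i : Int) (char : Char) (instr : Bool) (sc : Option Char) : Bool × Option Char :=
  if (char == '"' || char == '\'') && (i == 0 || !(PySem.List.pyGet? e (i-1) == some '\\')) then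
    if !instr then (true, some char)
    else if sc == some char then (false, none)
    else (instr, sc)
  else (instr, sc)

def pvP (char : Char) (depth : Int) : Int :=
  if char == '(' then depth + 1 else if char == ')' then depth - 1 else depth

def pvStep (e : List Char) (k : Nat) (s : Int × Bool × Option Char) : Int × Bool × Option Char :=
  match PySem.List.pyGet? e (k : Int) with
  | none => s
  | some char =>
    let qs := pvQ e (k : Int) char s.2.1 s.2.2
    if qs.1 then (s.1, qs.1, qs.2) else (pvP char s.1, qs.1, qs.2)

def pvSt (e : List Char) : Nat → Int × Bool × Option Char
  | 0 => (0, false, none)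
  | k + 1 => pvStep e k (pvSt e k)

def pvPhi (s : Int × Bool × Option Char) : Bool := !s.2.1 && s.1 == 0

def pvMatch (e o : List Char) (i : Int) : Bool :=
  PySem.List.slice e (some i) (some (i + PySem.List.len o)) == o

-- the common specification: first index in the list that is active and matches, else -1
def pvFirst (e o : List Char) : List Int → Int
  | [] => -1
  | i :: rest =>
    if pvPhi (pvSt e (i.toNat + 1)) && pvMatch e o i then i else pvFirst e o rest

theorem aLoop_cons (e o : List Char) (i : Int) (L : List Int)
    (d : Int) (instr : Bool) (sc : Option Char) :
    aLoop e o (i :: L) d instr sc =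
      (match PySem.List.pyGet? e i with
       | none => -1
       | some c =>
         let qs := pvQ e i c instr sc;
         if qs.1 then aLoop e o L d qs.1 qs.2
         else
           if (pvP c d == 0) && PySem.List.slice e (some i) (some (i + PySem.List.len o)) == o then i
           else aLoop e o L (pvP c d) qs.1 qs.2) := rfl

-- A's loop, started from the state after k characters, computes pvFirst of the remaining range.
theorem pvALoop_eq (e o : List Char) (ho : o ≠ []) :
    ∀ (m k : Nat),
      (((e.length : Int) - o.length + 1) - k).toNat ≤ m →
      aLoop e o (PySem.List.pyRange (k : Int) ((e.length : Int) - o.length + 1) 1)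
        (pvSt e k).1 (pvSt e k).2.1 (pvSt e k).2.2
      = pvFirst e o (PySem.List.pyRange (k : Int) ((e.length : Int) - o.length + 1) 1) := by
  intro m
  induction m with
  | zero =>
    intro k hm
    have : ((e.length : Int) - o.length + 1) ≤ k := by omega
    rw [PySem.List.pyRange_one_eq_nil this]
    rfl
  | succ m ih =>
    intro k hm
    by_cases hlt : (k : Int) < (e.length : Int) - o.length + 1
    · have holen : 1 ≤ (o.length : Int) := by
        have : o.length ≠ 0 := fun h => ho (List.eq_nil_of_length_eq_zero h)
        omega
      have hke : k < e.length := by omega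
      have hg : PySem.List.pyGet? e (k : Int) = some e[k] := by
        rw [PySem.List.pyGet?_natCast, List.getElem?_eq_getElem hke]
      rw [PySem.List.pyRange_one_cons hlt]
      rcases hsd : pvSt e k with ⟨d, instr, sc⟩
      have hstep : pvSt e (k + 1)
          = (let qs := pvQ e (k : Int) e[k] instr sc;
             if qs.1 then (d, qs.1, qs.2) else (pvP e[k] d, qs.1, qs.2)) := by
        show pvStep e k (pvSt e k) = _
        rw [hsd]; simp [pvStep, hg]
      have hcast : (k : Int) + 1 = ((k + 1 : Nat) : Int) := by push_cast; ring
      have ihk := ih (k + 1) (by omega)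
      rw [← hcast] at ihk
      rw [aLoop_cons]
      show (match PySem.List.pyGet? e (k : Int) with
       | none => -1
       | some c =>
         let qs := pvQ e (k : Int) c instr sc;
         if qs.1 then aLoop e o (PySem.List.pyRange ((k:Int)+1) ((e.length : Int) - o.length + 1) 1) d qs.1 qs.2
         else
           if (pvP c d == 0) && PySem.List.slice e (some (k:Int)) (some ((k:Int) + PySem.List.len o)) == o then (k:Int)
           else aLoop e o (PySem.List.pyRange ((k:Int)+1) ((e.length : Int) - o.length + 1) 1) (pvP c d) qs.1 qs.2)
        = pvFirst e o ((k:Int) :: PySem.List.pyRange ((k:Int)+1) ((e.length : Int) - o.length + 1) 1)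
      rw [hg]
      have htn : ((k : Int).toNat + 1) = k + 1 := by simp
      rw [pvFirst, htn]
      dsimp only
      cases hq1 : (pvQ e (k : Int) e[k] instr sc).1 with
      | true =>
        have hst : pvSt e (k + 1) = (d, (pvQ e (k : Int) e[k] instr sc).1, (pvQ e (k : Int) e[k] instr sc).2) := by
          rw [hstep]; simp [hq1]
        have hphi : pvPhi (pvSt e (k + 1)) = false := by rw [hst]; simp [pvPhi, hq1]
        rw [hphi]
        simp only [if_true, Bool.false_and, Bool.false_eq_true, if_false]
        rw [hst] at ihk
        simp only [hq1] at ihk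
        simpa using ihk
      | false =>
        have hst : pvSt e (k + 1) = (pvP e[k] d, (pvQ e (k : Int) e[k] instr sc).1, (pvQ e (k : Int) e[k] instr sc).2) := by
          rw [hstep]; simp [hq1]
        have hphi : pvPhi (pvSt e (k + 1)) = (pvP e[k] d == 0) := by rw [hst]; simp [pvPhi, hq1]
        rw [hphi]
        simp only [Bool.false_eq_true, if_false]
        rw [hst] at ihk
        simp only [hq1] at ihk
        by_cases hcond : ((pvP e[k] d == 0) && PySem.List.slice e (some (k : Int)) (some ((k : Int) + PySem.List.len o)) == o) = true
        · rw [if_pos hcond, if_pos (by simpa [pvMatch] using hcond)]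
        · rw [if_neg hcond, if_neg (by simpa [pvMatch] using hcond)]
          simpa using ihk
    · rw [PySem.List.pyRange_one_eq_nil (by omega)]; rfl

-- bTop's fold over the prefix recomputes the state machine.
theorem pvFold_eq (e : List Char) : ∀ n : Nat,
    (PySem.List.pyRange 0 (n : Int) 1).foldl
      (fun (s : Int × Bool × Option Char) (k : Int) =>
        match PySem.List.pyGet? e k with
        | none => s
        | some ch =>
          let qs : Bool × Option Char :=
            if (ch == '"' || ch == '\'') && (k == 0 || !(PySem.List.pyGet? e (k-1) == some '\\')) then
              if !s.2.1 then (true, some ch)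
              else if s.2.2 == some ch then (false, none)
              else (s.2.1, s.2.2)
            else (s.2.1, s.2.2)
          if qs.1 then (s.1, qs.1, qs.2)
          else ((if ch == '(' then s.1 + 1 else if ch == ')' then s.1 - 1 else s.1), qs.1, qs.2))
      (0, false, none)
    = pvSt e n := by
  intro n
  induction n with
  | zero => rw [PySem.List.pyRange_one_eq_nil (by omega)]; rfl
  | succ n ih =>
    have hcast : ((n + 1 : Nat) : Int) = (n : Int) + 1 := by push_cast; ring
    rw [hcast, PySem.List.pyRange_one_succ_right (by omega), List.foldl_append, ih, List.foldl_cons, List.foldl_nil]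
    show _ = pvStep e n (pvSt e n)
    rcases pvSt e n with ⟨d, instr, sc⟩
    simp only [pvStep, pvQ, pvP]

theorem bTop_eq (e : List Char) (k : Nat) :
    bTop e (k : Int) = pvPhi (pvSt e (k + 1)) := by
  have hcast : (k : Int) + 1 = ((k + 1 : Nat) : Int) := by push_cast; ring
  unfold bTop
  rw [hcast, pvFold_eq e (k + 1)]
  rfl

-- bFind's candidate scan versus pvFirst: either no match remains, or the first match j is
-- returned and pvFirst reduces to the check at j.
theorem pvFind_spec (e o : List Char) :
    ∀ (m : Nat) (start : Int), 0 ≤ start →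
      ((((e.length : Int) - o.length + 1) - start).toNat ≤ m) →
      (bFind e o start = -1 ∧ pvFirst e o (PySem.List.pyRange start ((e.length : Int) - o.length + 1) 1) = -1)
      ∨ (∃ j : Nat, bFind e o start = (j : Int) ∧ start ≤ (j : Int) ∧ (j : Int) < (e.length : Int) - o.length + 1
           ∧ pvFirst e o (PySem.List.pyRange start ((e.length : Int) - o.length + 1) 1)
             = (if pvPhi (pvSt e (j + 1)) then (j : Int)
                else pvFirst e o (PySem.List.pyRange ((j : Int) + 1) ((e.length : Int) - o.length + 1) 1))) := by
  intro m
  induction m with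
  | zero =>
    intro start h0 hm
    left
    have hle : (e.length : Int) - o.length + 1 ≤ start := by omega
    simp only [bFind, PySem.List.len_eq]
    rw [PySem.List.pyRange_one_eq_nil hle]
    exact ⟨rfl, rfl⟩
  | succ m ih =>
    intro start h0 hm
    by_cases hlt : start < (e.length : Int) - o.length + 1
    · have hcons := PySem.List.pyRange_one_cons hlt
      by_cases hmatch : (PySem.List.slice e (some start) (some (start + PySem.List.len o)) == o) = true
      · right
        have hsn : ((start.toNat : Nat) : Int) = start := by omega
        refine ⟨start.toNat, ?_, by omega, by omega, ?_⟩
        · simp only [bFind, PySem.List.len_eq]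
          rw [hcons, bFindGo, if_pos hmatch, hsn]
        · rw [hsn, hcons, pvFirst]
          have hm' : pvMatch e o start = true := hmatch
          rw [hm', Bool.and_true]
      · have hbf : bFind e o start = bFind e o (start + 1) := by
          simp only [bFind, PySem.List.len_eq]
          rw [hcons, bFindGo, if_neg hmatch]
        have hfirst : pvFirst e o (PySem.List.pyRange start ((e.length : Int) - o.length + 1) 1)
            = pvFirst e o (PySem.List.pyRange (start + 1) ((e.length : Int) - o.length + 1) 1) := by
          rw [hcons, pvFirst]
          have hm' : pvMatch e o start = false := by simpa [pvMatch] using hmatch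
          rw [hm', Bool.and_false, if_neg (by simp)]
        rw [hbf, hfirst]
        rcases ih (start + 1) (by omega) (by omega) with h | ⟨j, h1, h2, h3, h4⟩
        · exact Or.inl h
        · exact Or.inr ⟨j, h1, by omega, h3, h4⟩
    · left
      have hle : (e.length : Int) - o.length + 1 ≤ start := by omega
      simp only [bFind, PySem.List.len_eq]
      rw [PySem.List.pyRange_one_eq_nil hle]
      exact ⟨rfl, rfl⟩

-- B's outer loop computes pvFirst of the remaining range (fuel sufficient).
theorem pvOuter_eq (e o : List Char) :
    ∀ (fuel : Nat) (start : Int), 0 ≤ start →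
      ((((e.length : Int) - o.length + 1) - start).toNat < fuel) →
      bOuter e o fuel start
        = pvFirst e o (PySem.List.pyRange start ((e.length : Int) - o.length + 1) 1) := by
  intro fuel
  induction fuel with
  | zero => intro start h0 hf; omega
  | succ fuel ih =>
    intro start h0 hf
    rcases pvFind_spec e o (((e.length : Int) - o.length + 1) - start).toNat start h0 (le_refl _) with
      ⟨hfind, hfirst⟩ | ⟨j, hfind, hsj, hjN, hfirst⟩
    · rw [bOuter]
      simp only [hfind]
      rw [hfirst]
      rfl
    · rw [bOuter]
      simp only [hfind]
      have hne : (((j : Nat) : Int) == (-1 : Int)) = false := by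
        simp only [beq_eq_false_iff_ne, ne_eq]
        omega
      rw [hne]
      simp only [Bool.false_eq_true, if_false]
      rw [bTop_eq e j, hfirst]
      by_cases hphi : pvPhi (pvSt e (j + 1)) = true
      · rw [if_pos hphi, if_pos hphi]
      · rw [if_neg hphi, if_neg hphi]
        exact ih ((j : Int) + 1) (by omega) (by omega)

-- ===== VERDICT (by name: the statement is the Claim_ definition above) =====
theorem find_operator_py_spec : Claim_equal_find_operator_py := by
  intro expr op _ hpre
  unfold Spec_find_operator_py find_operator_py find_operator_py_alt
  have ho : op.toList ≠ [] := by
    simp only [ne_eq, String.toList_eq_nil_iff]; exact hpre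
  have holen : 1 ≤ (op.toList.length : Int) := by
    have : op.toList.length ≠ 0 := fun h => ho (List.eq_nil_of_length_eq_zero h)
    omega
  have hA := pvALoop_eq expr.toList op.toList ho
    (((expr.toList.length : Int) - op.toList.length + 1) - (0:Nat)).toNat 0 (le_refl _)
  simp only [Nat.cast_zero] at hA
  have hB := pvOuter_eq expr.toList op.toList (expr.toList.length + 1) 0 (by omega) (by omega)
  simp only [PySem.List.len_eq]
  rw [show ((0:Int) : Int) = ((0:Nat) : Int) by norm_num] at hA hB
  calc aLoop expr.toList op.toList
        (PySem.List.pyRange 0 ((expr.toList.length : Int) - op.toList.length + 1) 1) 0 false none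
      = pvFirst expr.toList op.toList
          (PySem.List.pyRange 0 ((expr.toList.length : Int) - op.toList.length + 1) 1) := by
        simpa [pvSt] using hA
    _ = bOuter expr.toList op.toList (expr.toList.length + 1) 0 := by simpa using hB.symm
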